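-- pv_equiv track=rewrite | github.com/ppls-nd-prs/lola | assigntools/LoLa/tp.py | gen_syllogism
-- ===== SOURCE A (Python) =====
-- def gen_syllogism(M, S, P, neg="not", types="aeio", figures="1234"):
--     """
--     Returns a generator that produces syllogisms. Each syllogism is a pair of
--     its id (consisting of the figure and sentence types) and a tuple of three
--     sentences (2 premises and a conclusion).
--     """
--     all_figures = {'1':('MP','SM'), '2':('PM','SM'), '3':('MP','MS'), '4':('PM','MS')}
--     all_types = {'a': "All {} are {}",
--                  'e': "No {} are {}",
--                  'i': "Some {} are {}",
--                  'o': f"Some {{}} are {neg} {{}}"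
--     }
--     # filter the figures and types based on the input
--     sel_figures = tuple( (f, v) for (f, v) in sorted(all_figures.items()) if f in figures )
--     sel_types = tuple( (t, v) for (t, v) in sorted(all_types.items()) if t in types )
--
--     d = {'M':M, 'S':S, 'P':P}
--     # generation by looping over figures
--     for f, (p1, p2) in sel_figures:
--         # make placeholders for f-string substitutions
--         p1 = [ f"{{{x}}}" for x in p1 ]
--         p2 = [ f"{{{x}}}" for x in p2 ]
--         p = [ '{S}', '{P}' ]
--         # generate sentences by looping over sentence types
--         for t, s in sel_types:
--             for t1, s1 in sel_types:
--                 for t2, s2 in sel_types: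
--                     prem1 = s1.format(*p1)
--                     prem2 = s2.format(*p2)
--                     con = s.format(*p)
--                     yield f"f{f}-{t1}{t2}{t}", (prem1.format(**d), prem2.format(**d), con.format(**d))
-- ===== SOURCE B (Python) =====
-- def gen_syllogism(M, S, P, neg="not", types="aeio", figures="1234"):
--     """
--     Same syllogisms, but produced by ONE flat loop over a mixed-radix index
--     range: each k in range(nf*nt**3) is decoded by div/mod into the figure and
--     the three sentence types, and the sentences are built directly by string
--     concatenation (no str.format, no nested loops).
--     """
--     def sent(t, x, y):
--         if t == 'a':
--             return f"All {x} are {y}"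
--         if t == 'e':
--             return f"No {x} are {y}"
--         if t == 'i':
--             return f"Some {x} are {y}"
--         return f"Some {x} are {neg} {y}"
--
--     sel_f = [f for f in "1234" if f in figures]
--     sel_t = [t for t in "aeio" if t in types]
--     figs = {'1': ((M, P), (S, M)), '2': ((P, M), (S, M)),
--             '3': ((M, P), (M, S)), '4': ((P, M), (M, S))}
--     nf, nt = len(sel_f), len(sel_t)
--     for k in range(nf * nt * nt * nt):
--         t2 = sel_t[k % nt]
--         q = k // nt
--         t1 = sel_t[q % nt]
--         q2 = q // nt
--         t = sel_t[q2 % nt]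
--         f = sel_f[q2 // nt]
--         pr = figs[f]
--         yield f"f{f}-{t1}{t2}{t}", (sent(t1, *pr[0]), sent(t2, *pr[1]), sent(t, S, P))
-- ===== Notes on version B (the rewrite author's own statement) =====
-- stated objective: alternative
-- what changed: B replaces A's four nested loops and double str.format of placeholder templates by a single flat loop over a mixed-radix index range(nf*nt^3), decoding (figure,t,t1,t2) from each index by div/mod and building each sentence directly by concatenation.
import Mathlib
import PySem

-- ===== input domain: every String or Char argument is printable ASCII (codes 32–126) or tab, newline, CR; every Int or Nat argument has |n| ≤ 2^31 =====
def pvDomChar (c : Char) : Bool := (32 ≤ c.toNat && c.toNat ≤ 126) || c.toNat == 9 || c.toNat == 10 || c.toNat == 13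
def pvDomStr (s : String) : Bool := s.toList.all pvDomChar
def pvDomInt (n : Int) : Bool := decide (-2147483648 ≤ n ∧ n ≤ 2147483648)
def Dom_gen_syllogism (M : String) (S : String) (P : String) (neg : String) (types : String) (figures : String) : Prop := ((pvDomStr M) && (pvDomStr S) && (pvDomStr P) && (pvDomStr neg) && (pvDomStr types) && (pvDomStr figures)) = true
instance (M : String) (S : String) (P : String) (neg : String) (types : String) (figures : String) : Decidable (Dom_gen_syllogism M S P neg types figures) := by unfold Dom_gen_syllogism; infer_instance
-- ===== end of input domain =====

set_option maxRecDepth 4000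


-- B replaces A's four nested loops and double str.format by ONE flat loop over a mixed-radix
-- index range, decoding (figure, t, t1, t2) by div/mod and concatenating sentences directly
-- (objective: alternative). A is a generator; its sequence of yields is what is ported and proved equal.

-- ===== PORT A =====
-- Hand port of Python str.format with positional-only arguments: exact for '{}' auto fields
-- and '{{'/'}}' escapes (the only field shapes A's templates reach inside Pre_); on any other
-- field shape it returns none, where A's Python .format raises or is unreachable inside Pre_.
def fmtP : List Char → List String → Nat → Option (List Char)
  | [], _, _ => some []
  | c :: rest, args, i =>
    if c = '{' then
      match rest with
      | '{' :: r => (fmtP r args i).map (fun t => '{' :: t)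
      | '}' :: r =>
        match args[i]? with
        | some a => (fmtP r args (i+1)).map (fun t => a.toList ++ t)
        | none => none
      | _ => none
    else if c = '}' then
      match rest with
      | '}' :: r => (fmtP r args i).map (fun t => '}' :: t)
      | _ => none
    else (fmtP rest args i).map (fun t => c :: t)

-- Hand port of str.format with keyword-only arguments: exact for single-character named fields
-- ('{M}', '{S}', '{P}') and escapes — the only field shapes reachable inside Pre_; none elsewhere,
-- where Python's .format raises (KeyError/IndexError/ValueError) or is unreachable inside Pre_.
def fmtK : List Char → List (String × String) → Option (List Char)
  | [], _ => some []
  | c :: rest, d =>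
    if c = '{' then
      match rest with
      | '{' :: r => (fmtK r d).map (fun t => '{' :: t)
      | n :: '}' :: r =>
        match d.find? (fun kv => kv.1 = String.singleton n) with
        | some kv => (fmtK r d).map (fun t => kv.2.toList ++ t)
        | none => none
      | _ => none
    else if c = '}' then
      match rest with
      | '}' :: r => (fmtK r d).map (fun t => '}' :: t)
      | _ => none
    else (fmtK rest d).map (fun t => c :: t)

def gen_syllogism (M : String) (S : String) (P : String) (neg : String) (types : String) (figures : String) : List (String × (String × String × String)) :=
  let all_figures : List (Char × (String × String)) :=
    [('1', ("MP", "SM")), ('2', ("PM", "SM")), ('3', ("MP", "MS")), ('4', ("PM", "MS"))]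
  let all_types : List (Char × String) :=
    [('a', "All {} are {}"), ('e', "No {} are {}"), ('i', "Some {} are {}"),
     ('o', "Some {} are " ++ neg ++ " {}")]
  -- 'f in figures' / 't in types': membership of a single character in a string
  let sel_figures := all_figures.filter (fun fv => figures.toList.contains fv.1)
  let sel_types := all_types.filter (fun tv => types.toList.contains tv.1)
  let d : List (String × String) := [("M", M), ("S", S), ("P", P)]
  sel_figures.flatMap (fun fv =>
    let p1 := fv.2.1.toList.map (fun x => "{" ++ String.singleton x ++ "}")
    let p2 := fv.2.2.toList.map (fun x => "{" ++ String.singleton x ++ "}")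
    let p : List String := ["{S}", "{P}"]
    sel_types.flatMap (fun ts =>
      sel_types.flatMap (fun t1s =>
        sel_types.map (fun t2s =>
          let prem1 := (fmtP t1s.2.toList p1 0).getD []   -- none = a raise in Python, excluded by Pre_
          let prem2 := (fmtP t2s.2.toList p2 0).getD []
          let con := (fmtP ts.2.toList p 0).getD []
          ("f" ++ String.singleton fv.1 ++ "-" ++ String.singleton t1s.1 ++ String.singleton t2s.1 ++ String.singleton ts.1,
           (String.ofList ((fmtK prem1 d).getD []),
            String.ofList ((fmtK prem2 d).getD []),
            String.ofList ((fmtK con d).getD [])))))))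

-- ===== PORT B =====
-- Source B's sent(t, x, y): direct construction of one sentence
def sentB (neg : String) (t : Char) (x : String) (y : String) : String :=
  if t = 'a' then "All " ++ x ++ " are " ++ y
  else if t = 'e' then "No " ++ x ++ " are " ++ y
  else if t = 'i' then "Some " ++ x ++ " are " ++ y
  else "Some " ++ x ++ " are " ++ neg ++ " " ++ y

-- dict lookup with default (Source B's figs[f]; the key is always present there)
def lookupD {β : Type} (tab : List (Char × β)) (c : Char) (dflt : β) : β :=
  ((tab.find? (fun kv => kv.1 = c)).map (fun kv => kv.2)).getD dflt

def gen_syllogism_alt (M : String) (S : String) (P : String) (neg : String) (types : String) (figures : String) : List (String × (String × String × String)) :=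
  let sel_f := "1234".toList.filter (fun f => figures.toList.contains f)
  let sel_t := "aeio".toList.filter (fun t => types.toList.contains t)
  let figs : List (Char × ((String × String) × (String × String))) :=
    [('1', ((M, P), (S, M))), ('2', ((P, M), (S, M))),
     ('3', ((M, P), (M, S))), ('4', ((P, M), (M, S)))]
  let nf := sel_f.length
  let nt := sel_t.length
  -- one flat loop over range(nf*nt*nt*nt), mixed-radix decode by // and %
  (List.range (nf * nt * nt * nt)).map (fun k =>
    let t2 := sel_t.getD (k % nt) 'a'   -- Python sel_t[i] raises only out of range; these indices are always in range
    let q := k / nt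
    let t1 := sel_t.getD (q % nt) 'a'
    let q2 := q / nt
    let t := sel_t.getD (q2 % nt) 'a'
    let f := sel_f.getD (q2 / nt) '1'
    let pr := lookupD figs f ((M, P), (S, M))
    ("f" ++ String.singleton f ++ "-" ++ String.singleton t1 ++ String.singleton t2 ++ String.singleton t,
     (sentB neg t1 pr.1.1 pr.1.2, sentB neg t2 pr.2.1 pr.2.2, sentB neg t S P)))

-- ===== PRECONDITION & SPEC =====
-- Pre_ excludes inputs where the 'o' sentence type is selected and neg contains a brace: there
-- A's two-stage str.format either raises (ValueError/KeyError/IndexError) or, for doubly escaped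
-- braces, returns neg with its braces unescaped twice — an artifact of re-formatting the already
-- substituted string; B uses neg literally on such inputs.
def Pre_gen_syllogism (M : String) (S : String) (P : String) (neg : String) (types : String) (figures : String) : Prop :=
  'o' ∈ types.toList → ('{' ∉ neg.toList ∧ '}' ∉ neg.toList)
instance (M : String) (S : String) (P : String) (neg : String) (types : String) (figures : String) : Decidable (Pre_gen_syllogism M S P neg types figures) := by unfold Pre_gen_syllogism; infer_instance

def pvWitness_gen_syllogism : String × String × String × String × String × String :=
  ("man", "greek", "mortal", "not", "aeio", "1234")

def Spec_gen_syllogism (M : String) (S : String) (P : String) (neg : String) (types : String) (figures : String) (out : List (String × (String × String × String))) : Prop := out = gen_syllogism_alt M S P neg types figures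
instance (M : String) (S : String) (P : String) (neg : String) (types : String) (figures : String) (out : List (String × (String × String × String))) : Decidable (Spec_gen_syllogism M S P neg types figures out) := by unfold Spec_gen_syllogism; infer_instance

-- ===== CLAIM (what is proved, stated in full; the proofs are below) =====
def Claim_equal_gen_syllogism : Prop := ∀ (M : String) (S : String) (P : String) (neg : String) (types : String) (figures : String), Dom_gen_syllogism M S P neg types figures → Pre_gen_syllogism M S P neg types figures → Spec_gen_syllogism M S P neg types figures (gen_syllogism M S P neg types figures)

-- ===== LEMMAS AND PROOFS =====

theorem fmtP_append_noBr (l r : List Char) (args : List String) (i : Nat)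
    (h : ∀ c ∈ l, c ≠ '{' ∧ c ≠ '}') :
    fmtP (l ++ r) args i = (fmtP r args i).map (fun t => l ++ t) := by
  induction l with
  | nil => simp
  | cons c l ih =>
    obtain ⟨h1, h2⟩ := h c List.mem_cons_self
    rw [List.cons_append, fmtP.eq_def]
    simp [h1, h2, ih (fun c hc => h c (List.mem_cons_of_mem _ hc)), Option.map_map,
          Function.comp_def]

theorem fmtK_append_noBr (l r : List Char) (d : List (String × String))
    (h : ∀ c ∈ l, c ≠ '{' ∧ c ≠ '}') :
    fmtK (l ++ r) d = (fmtK r d).map (fun t => l ++ t) := by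
  induction l with
  | nil => simp
  | cons c l ih =>
    obtain ⟨h1, h2⟩ := h c List.mem_cons_self
    rw [List.cons_append, fmtK.eq_def]
    simp [h1, h2, ih (fun c hc => h c (List.mem_cons_of_mem _ hc)), Option.map_map,
          Function.comp_def]

theorem fmtP_field (r : List Char) (args : List String) (i : Nat) :
    fmtP ('{' :: '}' :: r) args i = match args[i]? with
      | some a => (fmtP r args (i+1)).map (fun t => a.toList ++ t)
      | none => none := by
  rw [fmtP.eq_def]; simp

theorem ofList_eq (l : List Char) (s : String) (h : l = s.toList) : String.ofList l = s := by
  subst h; exact String.ofList_toList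

-- the sentence templates of A's all_types dict, and the figure pairs of its all_figures dict
def tmplA (neg : String) (t : Char) : String :=
  if t = 'a' then "All {} are {}" else if t = 'e' then "No {} are {}"
  else if t = 'i' then "Some {} are {}" else "Some {} are " ++ neg ++ " {}"

def figA (f : Char) : String × String :=
  if f = '1' then ("MP", "SM") else if f = '2' then ("PM", "SM")
  else if f = '3' then ("MP", "MS") else ("PM", "MS")

def pair5 (u v : Char) : Prop :=
  (u = 'M' ∧ v = 'P') ∨ (u = 'S' ∧ v = 'M') ∨ (u = 'M' ∧ v = 'S') ∨
  (u = 'P' ∧ v = 'M') ∨ (u = 'S' ∧ v = 'P')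

def dvS (M S P : String) (u : Char) : String := if u = 'M' then M else if u = 'S' then S else P

-- one sentence of A (template t, placeholders '{u}','{v}', then keyword substitution)
-- equals B's directly-built sentence
theorem chain_eq (M S P neg : String) (t u v : Char) (s1 s2 : String)
    (hs1 : s1.toList = ['{', u, '}']) (hs2 : s2.toList = ['{', v, '}'])
    (ht : t = 'a' ∨ t = 'e' ∨ t = 'i' ∨ t = 'o')
    (hp : pair5 u v)
    (hb : t = 'o' → '{' ∉ neg.toList ∧ '}' ∉ neg.toList) :
    String.ofList ((fmtK ((fmtP (tmplA neg t).toList [s1, s2] 0).getD [])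
        [("M", M), ("S", S), ("P", P)]).getD [])
      = sentB neg t (dvS M S P u) (dvS M S P v) := by
  have hMs : String.singleton 'M' = "M" := by decide
  have hSs : String.singleton 'S' = "S" := by decide
  have hPs : String.singleton 'P' = "P" := by decide
  rcases ht with rfl | rfl | rfl | rfl
  case inr.inr.inr =>
    -- t = 'o'
    obtain ⟨hb1, hb2⟩ := hb rfl
    have hnb : ∀ c ∈ neg.toList, c ≠ '{' ∧ c ≠ '}' :=
      fun c hc => ⟨fun e => hb1 (e ▸ hc), fun e => hb2 (e ▸ hc)⟩
    have h1 : (tmplA neg 'o').toList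
        = "Some ".toList ++ ('{' :: '}' :: (" are ".toList ++ (neg.toList ++ (' ' :: '{' :: '}' :: [])))) := by
      simp [tmplA, String.toList_append]
    rw [h1, fmtP_append_noBr _ _ _ _ (by simp), fmtP_field,
        fmtP_append_noBr _ _ _ _ (by simp), fmtP_append_noBr _ _ _ _ hnb,
        show (' ' :: '{' :: '}' :: [] : List Char) = [' '] ++ '{' :: '}' :: [] from rfl,
        fmtP_append_noBr _ _ _ _ (by simp), fmtP_field]
    rcases hp with ⟨rfl, rfl⟩ | ⟨rfl, rfl⟩ | ⟨rfl, rfl⟩ | ⟨rfl, rfl⟩ | ⟨rfl, rfl⟩ <;>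
      (simp [fmtP, fmtK, List.find?, hs1, hs2, hMs, hSs, hPs]
       rw [show ∀ r : List Char, ('e' :: ' ' :: r) = ['e', ' '] ++ r from fun _ => rfl,
           fmtK_append_noBr _ _ _ (by simp), fmtK_append_noBr _ _ _ hnb]
       simp [fmtK, List.find?, hMs, hSs, hPs]
       exact ofList_eq _ _ (by simp [sentB, dvS, String.toList_append]))
  all_goals
    rcases hp with ⟨rfl, rfl⟩ | ⟨rfl, rfl⟩ | ⟨rfl, rfl⟩ | ⟨rfl, rfl⟩ | ⟨rfl, rfl⟩ <;>
      (simp [tmplA, fmtP, fmtK, List.find?, hs1, hs2, hMs, hSs, hPs]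
       exact ofList_eq _ _ (by simp [sentB, dvS, String.toList_append]))

-- proof-only helpers: the common nested intermediate form
def selT (types : String) : List Char := "aeio".toList.filter (fun t => types.toList.contains t)
def selF (figures : String) : List Char := "1234".toList.filter (fun f => figures.toList.contains f)
def figsL (M S P : String) : List (Char × ((String × String) × (String × String))) :=
  [('1', ((M, P), (S, M))), ('2', ((P, M), (S, M))),
   ('3', ((M, P), (M, S))), ('4', ((P, M), (M, S)))]
def itemB (M S P neg : String) (f t t1 t2 : Char) : String × (String × String × String) :=
  let pr := lookupD (figsL M S P) f ((M, P), (S, M))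
  ("f" ++ String.singleton f ++ "-" ++ String.singleton t1 ++ String.singleton t2 ++ String.singleton t,
   (sentB neg t1 pr.1.1 pr.1.2, sentB neg t2 pr.2.1 pr.2.2, sentB neg t S P))
def nested (M S P neg types figures : String) : List (String × (String × String × String)) :=
  (selF figures).flatMap (fun f =>
    (selT types).flatMap (fun t =>
      (selT types).flatMap (fun t1 =>
        (selT types).map (fun t2 => itemB M S P neg f t t1 t2))))

-- a map over a list as a map over the index range
theorem map_getD_range {α β : Type} (xs : List α) (d : α) (g : α → β) :
    xs.map g = (List.range xs.length).map (fun i => g (xs.getD i d)) := by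
  refine List.ext_getElem (by simp) fun i h1 h2 => ?_
  have hi : i < xs.length := by simpa using h1
  simp [List.getD_eq_getElem?_getD, List.getElem?_eq_getElem hi]

-- a flatMap of index-range maps collapses into one index-range map (mixed radix)
theorem flatMap_range_map {α β : Type} (d : α) (n : Nat) (g : α → Nat → β) :
    ∀ xs : List α, xs.flatMap (fun x => (List.range n).map (g x)) =
      (List.range (xs.length * n)).map (fun k => g (xs.getD (k / n) d) (k % n)) := by
  intro xs
  induction xs with
  | nil => simp
  | cons x xs ih =>
    rcases Nat.eq_zero_or_pos n with hn | hn
    · subst hn; simp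
    · rw [List.flatMap_cons, List.length_cons, Nat.succ_mul, Nat.add_comm, List.range_add,
          List.map_append]
      congr 1
      · refine List.map_congr_left fun k hk => ?_
        have hk' := List.mem_range.mp hk
        rw [Nat.div_eq_of_lt hk', Nat.mod_eq_of_lt hk', List.getD_cons_zero]
      · rw [ih, List.map_map]
        refine List.map_congr_left fun j _ => ?_
        simp only [Function.comp]
        rw [Nat.add_comm n j, Nat.add_div_right j hn, Nat.add_mod_right j n,
            List.getD_cons_succ]

-- mixed-radix arithmetic identities
theorem idxA (k nt : Nat) : k % (nt * (nt * nt)) % (nt * nt) % nt = k % nt := by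
  rw [Nat.mod_mod_of_dvd k (dvd_mul_left (nt * nt) nt),
      Nat.mod_mod_of_dvd k (dvd_mul_left nt nt)]
theorem idxB (k nt : Nat) : k % (nt * (nt * nt)) % (nt * nt) / nt = k / nt % nt := by
  rw [Nat.mod_mod_of_dvd k (dvd_mul_left (nt * nt) nt), Nat.mod_mul_right_div_self]
theorem idxC (k nt : Nat) : k % (nt * (nt * nt)) / (nt * nt) = k / nt / nt % nt := by
  rw [show nt * (nt * nt) = nt * nt * nt from (Nat.mul_assoc nt nt nt).symm,
      Nat.mod_mul_right_div_self, Nat.div_div_eq_div_mul]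
theorem idxD (k nt : Nat) : k / (nt * (nt * nt)) = k / nt / nt / nt := by
  conv_rhs => rw [Nat.div_div_eq_div_mul, Nat.div_div_eq_div_mul]

theorem alt_eq_nested (M S P neg types figures : String) :
    gen_syllogism_alt M S P neg types figures = nested M S P neg types figures := by
  symm
  calc nested M S P neg types figures
      = (selF figures).flatMap (fun f =>
          (selT types).flatMap (fun t =>
            (selT types).flatMap (fun t1 =>
              (List.range (selT types).length).map (fun i =>
                itemB M S P neg f t t1 ((selT types).getD i 'a'))))) := by
        refine List.flatMap_congr fun f _ => List.flatMap_congr fun t _ =>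
          List.flatMap_congr fun t1 _ => ?_
        exact map_getD_range (selT types) 'a' _
    _ = (selF figures).flatMap (fun f =>
          (selT types).flatMap (fun t =>
            (List.range ((selT types).length * (selT types).length)).map (fun k =>
              itemB M S P neg f t ((selT types).getD (k / (selT types).length) 'a')
                ((selT types).getD (k % (selT types).length) 'a')))) := by
        refine List.flatMap_congr fun f _ => List.flatMap_congr fun t _ => ?_
        exact flatMap_range_map 'a' (selT types).length
          (fun t1 i => itemB M S P neg f t t1 ((selT types).getD i 'a')) (selT types)
    _ = (selF figures).flatMap (fun f =>
          (List.range ((selT types).length * ((selT types).length * (selT types).length))).map (fun k =>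
            itemB M S P neg f ((selT types).getD (k / ((selT types).length * (selT types).length)) 'a')
              ((selT types).getD (k % ((selT types).length * (selT types).length) / (selT types).length) 'a')
              ((selT types).getD (k % ((selT types).length * (selT types).length) % (selT types).length) 'a'))) := by
        refine List.flatMap_congr fun f _ => ?_
        exact flatMap_range_map 'a' ((selT types).length * (selT types).length)
          (fun t k => itemB M S P neg f t ((selT types).getD (k / (selT types).length) 'a')
            ((selT types).getD (k % (selT types).length) 'a')) (selT types)
    _ = (List.range ((selF figures).length * ((selT types).length * ((selT types).length * (selT types).length)))).map (fun k =>
          itemB M S P neg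
            ((selF figures).getD (k / ((selT types).length * ((selT types).length * (selT types).length))) '1')
            ((selT types).getD (k % ((selT types).length * ((selT types).length * (selT types).length)) / ((selT types).length * (selT types).length)) 'a')
            ((selT types).getD (k % ((selT types).length * ((selT types).length * (selT types).length)) % ((selT types).length * (selT types).length) / (selT types).length) 'a')
            ((selT types).getD (k % ((selT types).length * ((selT types).length * (selT types).length)) % ((selT types).length * (selT types).length) % (selT types).length) 'a')) :=
        flatMap_range_map '1' ((selT types).length * ((selT types).length * (selT types).length))
          (fun f k => itemB M S P neg f
            ((selT types).getD (k / ((selT types).length * (selT types).length)) 'a')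
            ((selT types).getD (k % ((selT types).length * (selT types).length) / (selT types).length) 'a')
            ((selT types).getD (k % ((selT types).length * (selT types).length) % (selT types).length) 'a')) (selF figures)
    _ = (List.range ((selF figures).length * (selT types).length * (selT types).length * (selT types).length)).map (fun k =>
          itemB M S P neg
            ((selF figures).getD (k / (selT types).length / (selT types).length / (selT types).length) '1')
            ((selT types).getD (k / (selT types).length / (selT types).length % (selT types).length) 'a')
            ((selT types).getD (k / (selT types).length % (selT types).length) 'a')
            ((selT types).getD (k % (selT types).length) 'a')) := by
        rw [show (selF figures).length * ((selT types).length * ((selT types).length * (selT types).length))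
              = (selF figures).length * (selT types).length * (selT types).length * (selT types).length by ring]
        refine List.map_congr_left fun k _ => ?_
        rw [idxA, idxB, idxC, idxD]
    _ = gen_syllogism_alt M S P neg types figures := by
        simp only [gen_syllogism_alt, selT, selF, itemB, figsL]

theorem lookupD_figsL (M S P : String) (f : Char) :
    (f = '1' ∨ f = '2' ∨ f = '3' ∨ f = '4') →
    lookupD (figsL M S P) f ((M, P), (S, M))
      = ((dvS M S P ((figA f).1.toList.getD 0 'M'), dvS M S P ((figA f).1.toList.getD 1 'M')),
         (dvS M S P ((figA f).2.toList.getD 0 'M'), dvS M S P ((figA f).2.toList.getD 1 'M'))) := by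
  rintro (rfl | rfl | rfl | rfl) <;> simp [lookupD, figsL, figA, dvS, List.find?]

-- the whole inner triple loop for one figure, A-form = nested itemB form
theorem leaf3 (M S P neg types : String)
    (hpre' : 'o' ∈ types.toList → '{' ∉ neg.toList ∧ '}' ∉ neg.toList)
    (u1 v1 u2 v2 : Char) (p1s p2s : String)
    (hp1s : p1s.toList = [u1, v1]) (hp2s : p2s.toList = [u2, v2])
    (hp1 : pair5 u1 v1) (hp2 : pair5 u2 v2) (f : Char)
    (hpr : lookupD (figsL M S P) f ((M, P), (S, M))
      = ((dvS M S P u1, dvS M S P v1), (dvS M S P u2, dvS M S P v2))) :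
    List.flatMap (fun t =>
      List.flatMap (fun t1 =>
        List.map (fun t2 =>
          ("f" ++ String.singleton f ++ "-" ++ String.singleton t1 ++ String.singleton t2 ++ String.singleton t,
           (String.ofList ((fmtK ((fmtP (tmplA neg t1).toList
                (List.map (fun x => "{" ++ String.singleton x ++ "}") p1s.toList) 0).getD [])
                [("M", M), ("S", S), ("P", P)]).getD []),
            String.ofList ((fmtK ((fmtP (tmplA neg t2).toList
                (List.map (fun x => "{" ++ String.singleton x ++ "}") p2s.toList) 0).getD [])
                [("M", M), ("S", S), ("P", P)]).getD []),
            String.ofList ((fmtK ((fmtP (tmplA neg t).toList ["{S}", "{P}"] 0).getD [])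
                [("M", M), ("S", S), ("P", P)]).getD []))))
          (selT types)) (selT types)) (selT types)
    = List.flatMap (fun t =>
        List.flatMap (fun t1 =>
          List.map (fun t2 => itemB M S P neg f t t1 t2) (selT types)) (selT types)) (selT types) := by
  have hsel : ∀ t ∈ selT types,
      (t = 'a' ∨ t = 'e' ∨ t = 'i' ∨ t = 'o') ∧ (t = 'o' → '{' ∉ neg.toList ∧ '}' ∉ neg.toList) := by
    intro t htf
    obtain ⟨htm, hc⟩ := List.mem_filter.mp htf
    refine ⟨by simpa using htm, fun h => hpre' ?_⟩
    subst h; simpa using hc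
  refine List.flatMap_congr fun t ht => ?_
  refine List.flatMap_congr fun t1 ht1 => ?_
  refine List.map_congr_left fun t2 ht2 => ?_
  obtain ⟨ht', hbt⟩ := hsel t ht
  obtain ⟨ht1', hbt1⟩ := hsel t1 ht1
  obtain ⟨ht2', hbt2⟩ := hsel t2 ht2
  simp only [itemB, hpr, Prod.mk.injEq]
  refine ⟨trivial, ?_, ?_, ?_⟩
  · rw [hp1s]
    simp only [List.map]
    exact chain_eq M S P neg t1 u1 v1 _ _ (by simp) (by simp) ht1' hp1 hbt1
  · rw [hp2s]
    simp only [List.map]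
    exact chain_eq M S P neg t2 u2 v2 _ _ (by simp) (by simp) ht2' hp2 hbt2
  · have := chain_eq M S P neg t 'S' 'P' "{S}" "{P}" (by simp) (by simp) ht'
      (Or.inr (Or.inr (Or.inr (Or.inr ⟨rfl, rfl⟩)))) hbt
    simpa [dvS] using this

theorem A_eq_nested (M S P neg types figures : String)
    (hpre : Pre_gen_syllogism M S P neg types figures) :
    gen_syllogism M S P neg types figures = nested M S P neg types figures := by
  have hpre' : 'o' ∈ types.toList → '{' ∉ neg.toList ∧ '}' ∉ neg.toList := hpre
  simp only [gen_syllogism, nested]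
  have hfig : ([('1', (("MP" : String), ("SM" : String))), ('2', ("PM", "SM")),
      ('3', ("MP", "MS")), ('4', ("PM", "MS"))]) = "1234".toList.map (fun f => (f, figA f)) := by
    simp [figA]
  have htyp : ([('a', "All {} are {}"), ('e', "No {} are {}"), ('i', "Some {} are {}"),
      ('o', "Some {} are " ++ neg ++ " {}")]) = "aeio".toList.map (fun t => (t, tmplA neg t)) := by
    simp [tmplA]
  rw [hfig, htyp]
  simp only [List.filter_map, List.flatMap_map, List.map_map, Function.comp_def]
  show List.flatMap _ (selF figures) = _
  refine List.flatMap_congr fun f hf => ?_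
  have hf4 : f = '1' ∨ f = '2' ∨ f = '3' ∨ f = '4' := by
    simpa using (List.mem_filter.mp hf).1
  have hpr := lookupD_figsL M S P f hf4
  rcases hf4 with rfl | rfl | rfl | rfl
  · exact leaf3 M S P neg types hpre' 'M' 'P' 'S' 'M' "MP" "SM" (by simp) (by simp)
      (Or.inl ⟨rfl, rfl⟩) (Or.inr (Or.inl ⟨rfl, rfl⟩)) '1' (by simpa [figA] using hpr)
  · exact leaf3 M S P neg types hpre' 'P' 'M' 'S' 'M' "PM" "SM" (by simp) (by simp)
      (Or.inr (Or.inr (Or.inr (Or.inl ⟨rfl, rfl⟩)))) (Or.inr (Or.inl ⟨rfl, rfl⟩)) '2'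
      (by simpa [figA] using hpr)
  · exact leaf3 M S P neg types hpre' 'M' 'P' 'M' 'S' "MP" "MS" (by simp) (by simp)
      (Or.inl ⟨rfl, rfl⟩) (Or.inr (Or.inr (Or.inl ⟨rfl, rfl⟩))) '3' (by simpa [figA] using hpr)
  · exact leaf3 M S P neg types hpre' 'P' 'M' 'M' 'S' "PM" "MS" (by simp) (by simp)
      (Or.inr (Or.inr (Or.inr (Or.inl ⟨rfl, rfl⟩)))) (Or.inr (Or.inr (Or.inl ⟨rfl, rfl⟩))) '4'
      (by simpa [figA] using hpr)

-- ===== VERDICT (by name: the statement is the Claim_ definition above) =====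
theorem gen_syllogism_spec : Claim_equal_gen_syllogism := by
  intro M S P neg types figures _ hpre
  show gen_syllogism M S P neg types figures = gen_syllogism_alt M S P neg types figures
  rw [A_eq_nested M S P neg types figures hpre, alt_eq_nested]
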